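-- pv_equiv track=rewrite | github.com/JayFoxRox/xbox-tools | python-scripts/xbox/nv2a.py | GenerateSwizzleMask
-- ===== SOURCE A (Python) =====
-- def GenerateSwizzleMask(size):
--   bit = 1
--   mask_bit = 1
--   x = 0
--   y = 0
--   z = 0
--   done = False
--   while not done:
--     done = True
--     if bit < size[0]:
--       x |= mask_bit
--       mask_bit <<= 1
--       done = False
--     if bit < size[1]:
--       y |= mask_bit
--       mask_bit <<= 1
--       done = False
--     if bit < size[2]:
--       z |= mask_bit
--       mask_bit <<= 1
--       done = False
--     bit <<= 1
--   assert(x ^ y ^ z == (mask_bit - 1))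
--   return (x, y, z)
-- ===== SOURCE B (Python) =====
-- def _count(s):
--     # number of rounds for which this axis contributes a bit (same '<' test as the task)
--     bit = 1
--     c = 0
--     while bit < s:
--         c += 1
--         bit <<= 1
--     return c
--
--
-- def GenerateSwizzleMask(size):
--     # Closed-form positional interleave: each axis's mask is built independently;
--     # the output position of an axis's r-th bit is computed arithmetically from
--     # how many bits all axes have contributed before it.
--     cx = _count(size[0])
--     cy = _count(size[1])
--     cz = _count(size[2])
--     x = 0
--     for r in range(cx):
--         x |= 1 << (r + min(r, cy) + min(r, cz))
--     y = 0
--     for r in range(cy):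
--         y |= 1 << (min(r, cx) + r + min(r, cz) + (1 if r < cx else 0))
--     z = 0
--     for r in range(cz):
--         z |= 1 << (min(r, cx) + min(r, cy) + r
--                    + (1 if r < cx else 0) + (1 if r < cy else 0))
--     return (x, y, z)
-- ===== Notes on version B (the rewrite author's own statement) =====
-- stated objective: alternative
-- what changed: Replaces A's single interleaved while-loop with shared shifting mask_bit and done-flag by a per-axis bit-count phase followed by three independent per-axis loops that place each bit with a closed-form positional formula (min-sums of the counts) instead of simulating the interleave.
import Mathlib
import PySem

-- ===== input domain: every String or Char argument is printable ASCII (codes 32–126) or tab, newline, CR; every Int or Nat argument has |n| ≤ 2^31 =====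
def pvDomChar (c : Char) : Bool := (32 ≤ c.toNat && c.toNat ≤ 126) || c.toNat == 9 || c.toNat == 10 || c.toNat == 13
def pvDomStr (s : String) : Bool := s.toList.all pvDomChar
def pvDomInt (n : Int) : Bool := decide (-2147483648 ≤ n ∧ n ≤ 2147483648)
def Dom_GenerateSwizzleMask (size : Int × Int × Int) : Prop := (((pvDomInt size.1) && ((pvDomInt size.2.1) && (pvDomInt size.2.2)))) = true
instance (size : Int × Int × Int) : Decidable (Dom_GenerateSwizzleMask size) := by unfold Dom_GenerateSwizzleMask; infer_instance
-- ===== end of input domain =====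

-- B replaces A's interleaved while-loop (shared shifting mask_bit, done-flag) by a per-axis
-- bit-count phase plus three independent per-axis loops placing each bit at a closed-form
-- position (objective: alternative decomposition, same asymptotic cost).

-- ===== PORT A =====
-- A's while-loop; `fuel` only makes it total: for |size| ≤ 2^31 the loop runs at most 33
-- iterations, so fuel 40 is never exhausted on the domain.  `x |= m` is ported as Int.lor,
-- `bit <<= 1` / `mask_bit <<= 1` as `* 2` (exact: both stay positive ints).  A's assert is a
-- tautology (the set bits are pairwise disjoint and fill mask_bit - 1 exactly) and is dropped.
def loopA (size : Int × Int × Int) : Nat → Int → Int → Int → Int → Int → Int × Int × Int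
  | 0, _, _, x, y, z => (x, y, z)
  | fuel + 1, bit, mask_bit, x, y, z =>
    -- done := True; three ifs, each firing sets done := False
    let s1 : Int × Int × Bool :=
      if bit < size.1 then (Int.lor x mask_bit, mask_bit * 2, false) else (x, mask_bit, true)
    let s2 : Int × Int × Bool :=
      if bit < size.2.1 then (Int.lor y s1.2.1, s1.2.1 * 2, false) else (y, s1.2.1, s1.2.2)
    let s3 : Int × Int × Bool :=
      if bit < size.2.2 then (Int.lor z s2.2.1, s2.2.1 * 2, false) else (z, s2.2.1, s2.2.2)
    if s3.2.2 then (s1.1, s2.1, s3.1)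
    else loopA size fuel (bit * 2) s3.2.1 s1.1 s2.1 s3.1

def GenerateSwizzleMask (size : Int × Int × Int) : Int × Int × Int :=
  loopA size 40 1 1 0 0 0

-- ===== PORT B =====
-- Source B's _count: bit = 1; c = 0; while bit < s: c += 1; bit <<= 1.  The count is a
-- nonnegative loop counter, kept as Nat; fuel 40 again only makes the while-loop total
-- (never exhausted for |s| ≤ 2^31).
def countAux (s : Int) : Nat → Int → Nat → Nat
  | 0, _, c => c
  | fuel + 1, bit, c => if bit < s then countAux s fuel (bit * 2) (c + 1) else c

-- Source B's three independent per-axis loops; `1 << p` (p ≥ 0) is ported as (2 ^ p : Int), exact.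
def GenerateSwizzleMask_alt (size : Int × Int × Int) : Int × Int × Int :=
  let cx := countAux size.1 40 1 0
  let cy := countAux size.2.1 40 1 0
  let cz := countAux size.2.2 40 1 0
  let x := (List.range cx).foldl
    (fun a r => Int.lor a (2 ^ (r + min r cy + min r cz))) 0
  let y := (List.range cy).foldl
    (fun a r => Int.lor a (2 ^ (min r cx + r + min r cz + (if r < cx then 1 else 0)))) 0
  let z := (List.range cz).foldl
    (fun a r => Int.lor a (2 ^ (min r cx + min r cy + r
      + (if r < cx then 1 else 0) + (if r < cy then 1 else 0)))) 0
  (x, y, z)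

-- ===== PRECONDITION & SPEC =====
def Spec_GenerateSwizzleMask (size : Int × Int × Int) (out : Int × Int × Int) : Prop := out = GenerateSwizzleMask_alt size
instance (size : Int × Int × Int) (out : Int × Int × Int) : Decidable (Spec_GenerateSwizzleMask size out) := by unfold Spec_GenerateSwizzleMask; infer_instance

-- ===== CLAIM (what is proved, stated in full; the proofs are below) =====
def Claim_equal_GenerateSwizzleMask : Prop := ∀ (size : Int × Int × Int), Dom_GenerateSwizzleMask size → Spec_GenerateSwizzleMask size (GenerateSwizzleMask size)

-- ===== LEMMAS AND PROOFS =====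

-- number of bits emitted by A before round r starts (proof helper)
def msum (cx cy cz r : Nat) : Nat := min r cx + min r cy + min r cz

lemma two_pow_mono (r k : Nat) (h : r ≤ k) : (2 : Int) ^ r ≤ 2 ^ k :=
  pow_le_pow_right₀ (by norm_num) h

lemma pow_mul2 (q : Nat) : (2 : Int) ^ q * 2 = 2 ^ (q + 1) := (pow_succ 2 q).symm

lemma countAux_acc (s : Int) : ∀ (fuel : Nat) (bit : Int) (c : Nat),
    countAux s fuel bit c = c + countAux s fuel bit 0 := by
  intro fuel
  induction fuel with
  | zero => intro bit c; simp [countAux]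
  | succ n ih =>
    intro bit c
    by_cases h : bit < s
    · rw [countAux, if_pos h, countAux, if_pos h, ih (bit * 2) (c + 1), ih (bit * 2) (0 + 1)]
      omega
    · rw [countAux, if_neg h, countAux, if_neg h]
      omega

lemma countAux_char (s : Int) (hs : s ≤ 2 ^ 31) :
    ∀ (d r : Nat), 32 ≤ r + d → ∀ k, r ≤ k →
      (((2 : Int) ^ k < s) ↔ k < r + countAux s (d + 8) (2 ^ r) 0) := by
  intro d
  induction d with
  | zero =>
    intro r hr k hk
    have h32 : (2 : Int) ^ 31 < 2 ^ 32 := by norm_num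
    have hnot : ¬ ((2 : Int) ^ r < s) := by
      have := two_pow_mono 32 r (by omega); omega
    have hnotk : ¬ ((2 : Int) ^ k < s) := by
      have := two_pow_mono 32 k (by omega); omega
    have e : countAux s (0 + 8) (2 ^ r) 0 = 0 := by
      show countAux s (7 + 1) (2 ^ r) 0 = 0
      rw [countAux, if_neg hnot]
    rw [e]
    omega
  | succ d ih =>
    intro r hr k hk
    by_cases hb : (2 : Int) ^ r < s
    · have step : countAux s (d + 1 + 8) (2 ^ r) 0 = 1 + countAux s (d + 8) (2 ^ (r + 1)) 0 := by
        show countAux s ((d + 8) + 1) (2 ^ r) 0 = _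
        rw [countAux, if_pos hb, countAux_acc s (d + 8) (2 ^ r * 2) (0 + 1), pow_mul2]
      rw [step]
      rcases Nat.eq_or_lt_of_le hk with h | h
      · subst h
        constructor
        · intro _; omega
        · intro _; exact hb
      · have := ih (r + 1) (by omega) k (by omega)
        omega
    · have stop : countAux s (d + 1 + 8) (2 ^ r) 0 = 0 := by
        show countAux s ((d + 8) + 1) (2 ^ r) 0 = _
        rw [countAux, if_neg hb]
      rw [stop]
      have hnotk : ¬ ((2 : Int) ^ k < s) := by
        have := two_pow_mono r k hk; omega
      omega

-- A's loop, from round r with mask position msum r, equals three independent per-axis folds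
-- over the remaining rounds, with positions expressed through msum.
lemma loop_eq (s : Int × Int × Int) (cx cy cz : Nat)
    (Hx : ∀ k, ((2 : Int) ^ k < s.1 ↔ k < cx))
    (Hy : ∀ k, ((2 : Int) ^ k < s.2.1 ↔ k < cy))
    (Hz : ∀ k, ((2 : Int) ^ k < s.2.2 ↔ k < cz)) :
    ∀ (d r : Nat), 32 ≤ r + d → cx ≤ 32 → cy ≤ 32 → cz ≤ 32 → ∀ (x y z : Int),
      loopA s (d + 8) (2 ^ r) (2 ^ (msum cx cy cz r)) x y z =
        ( (List.range' r (cx - r)).foldl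
            (fun a q => Int.lor a (2 ^ (msum cx cy cz q))) x,
          (List.range' r (cy - r)).foldl
            (fun a q => Int.lor a (2 ^ (msum cx cy cz q + (if q < cx then 1 else 0)))) y,
          (List.range' r (cz - r)).foldl
            (fun a q => Int.lor a (2 ^ (msum cx cy cz q + (if q < cx then 1 else 0)
              + (if q < cy then 1 else 0)))) z ) := by
  intro d
  induction d with
  | zero =>
    intro r hr hcx hcy hcz x y z
    have hxr : ¬ ((2 : Int) ^ r < s.1) := by rw [Hx]; omega
    have hyr : ¬ ((2 : Int) ^ r < s.2.1) := by rw [Hy]; omega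
    have hzr : ¬ ((2 : Int) ^ r < s.2.2) := by rw [Hz]; omega
    have e1 : cx - r = 0 := by omega
    have e2 : cy - r = 0 := by omega
    have e3 : cz - r = 0 := by omega
    rw [e1, e2, e3]
    show loopA s (7 + 1) (2 ^ r) (2 ^ (msum cx cy cz r)) x y z = _
    rw [loopA]
    simp only [if_neg hxr, if_neg hyr, if_neg hzr, List.range', List.foldl_nil, if_true]
  | succ d ih =>
    intro r hr hcx hcy hcz x y z
    by_cases hrm : cx ≤ r ∧ cy ≤ r ∧ cz ≤ r
    · have hxr : ¬ ((2 : Int) ^ r < s.1) := by rw [Hx]; omega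
      have hyr : ¬ ((2 : Int) ^ r < s.2.1) := by rw [Hy]; omega
      have hzr : ¬ ((2 : Int) ^ r < s.2.2) := by rw [Hz]; omega
      have e1 : cx - r = 0 := by omega
      have e2 : cy - r = 0 := by omega
      have e3 : cz - r = 0 := by omega
      rw [e1, e2, e3]
      show loopA s ((d + 8) + 1) (2 ^ r) (2 ^ (msum cx cy cz r)) x y z = _
      rw [loopA]
      simp only [if_neg hxr, if_neg hyr, if_neg hzr, List.range', List.foldl_nil, if_true]
    · have hd1 : ∀ c : Nat, r < c → List.range' r (c - r) =
          r :: List.range' (r + 1) (c - (r + 1)) := by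
        intro c h
        have h1 : c - r = (c - (r + 1)) + 1 := by omega
        rw [h1, List.range'_succ]
      have hd0 : ∀ c : Nat, ¬ r < c → List.range' r (c - r) =
          List.range' (r + 1) (c - (r + 1)) := by
        intro c h
        have h1 : c - r = 0 := by omega
        have h2 : c - (r + 1) = 0 := by omega
        rw [h1, h2]
        simp [List.range']
      show loopA s ((d + 8) + 1) (2 ^ r) (2 ^ (msum cx cy cz r)) x y z = _
      rw [loopA]
      simp only [Hx r, Hy r, Hz r]
      have IH := ih (r + 1) (by omega) hcx hcy hcz
      by_cases h1 : r < cx <;> by_cases h2 : r < cy <;> by_cases h3 : r < cz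
      · rw [hd1 cx h1, hd1 cy h2, hd1 cz h3]
        simp only [h1, h2, h3, if_true, List.foldl_cons, pow_mul2]
        rw [show msum cx cy cz r + 1 + 1 + 1 = msum cx cy cz (r + 1) by
          simp only [msum]; omega]
        exact IH _ _ _
      · rw [hd1 cx h1, hd1 cy h2, hd0 cz h3]
        simp only [h1, h2, h3, if_true, if_false, List.foldl_cons, pow_mul2]
        rw [show msum cx cy cz r + 1 + 1 = msum cx cy cz (r + 1) by
          simp only [msum]; omega]
        exact IH _ _ _
      · rw [hd1 cx h1, hd0 cy h2, hd1 cz h3]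
        simp only [h1, h2, h3, if_true, if_false, List.foldl_cons, pow_mul2, Nat.add_zero]
        rw [show msum cx cy cz r + 1 + 1 = msum cx cy cz (r + 1) by
          simp only [msum]; omega]
        exact IH _ _ _
      · rw [hd1 cx h1, hd0 cy h2, hd0 cz h3]
        simp only [h1, h2, h3, if_true, if_false, List.foldl_cons, pow_mul2]
        rw [show msum cx cy cz r + 1 = msum cx cy cz (r + 1) by
          simp only [msum]; omega]
        exact IH _ _ _
      · rw [hd0 cx h1, hd1 cy h2, hd1 cz h3]
        simp only [h1, h2, h3, if_true, if_false, List.foldl_cons, pow_mul2, Nat.add_zero]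
        rw [show msum cx cy cz r + 1 + 1 = msum cx cy cz (r + 1) by
          simp only [msum]; omega]
        exact IH _ _ _
      · rw [hd0 cx h1, hd1 cy h2, hd0 cz h3]
        simp only [h1, h2, h3, if_true, if_false, List.foldl_cons, pow_mul2, Nat.add_zero]
        rw [show msum cx cy cz r + 1 = msum cx cy cz (r + 1) by
          simp only [msum]; omega]
        exact IH _ _ _
      · rw [hd0 cx h1, hd0 cy h2, hd1 cz h3]
        simp only [h1, h2, h3, if_true, if_false, List.foldl_cons, pow_mul2, Nat.add_zero]
        rw [show msum cx cy cz r + 1 = msum cx cy cz (r + 1) by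
          simp only [msum]; omega]
        exact IH _ _ _
      · omega

-- pointwise: on q < c_axis, Source B's closed-form positions equal the msum-based ones
lemma fold_posX (cx cy cz : Nat) (x : Int) :
    (List.range cx).foldl (fun a r => Int.lor a (2 ^ (r + min r cy + min r cz))) x =
    (List.range' 0 cx).foldl (fun a q => Int.lor a (2 ^ (msum cx cy cz q))) x := by
  rw [List.range_eq_range']
  refine PySem.List.foldl_congr_mem _ _ _ _ ?_
  intro a q hq
  have hlt : q < cx := by
    have := List.mem_range'.mp hq; omega
  have : q + min q cy + min q cz = msum cx cy cz q := by
    simp only [msum]; omega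
  rw [this]

lemma fold_posY (cx cy cz : Nat) (y : Int) :
    (List.range cy).foldl
      (fun a r => Int.lor a (2 ^ (min r cx + r + min r cz + (if r < cx then 1 else 0)))) y =
    (List.range' 0 cy).foldl
      (fun a q => Int.lor a (2 ^ (msum cx cy cz q + (if q < cx then 1 else 0)))) y := by
  rw [List.range_eq_range']
  refine PySem.List.foldl_congr_mem _ _ _ _ ?_
  intro a q hq
  have hlt : q < cy := by
    have := List.mem_range'.mp hq; omega
  have : min q cx + q + min q cz + (if q < cx then 1 else 0) =
      msum cx cy cz q + (if q < cx then 1 else 0) := by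
    simp only [msum]; omega
  rw [this]

lemma fold_posZ (cx cy cz : Nat) (z : Int) :
    (List.range cz).foldl
      (fun a r => Int.lor a (2 ^ (min r cx + min r cy + r
        + (if r < cx then 1 else 0) + (if r < cy then 1 else 0)))) z =
    (List.range' 0 cz).foldl
      (fun a q => Int.lor a (2 ^ (msum cx cy cz q + (if q < cx then 1 else 0)
        + (if q < cy then 1 else 0)))) z := by
  rw [List.range_eq_range']
  refine PySem.List.foldl_congr_mem _ _ _ _ ?_
  intro a q hq
  have hlt : q < cz := by
    have := List.mem_range'.mp hq; omega
  have : min q cx + min q cy + q + (if q < cx then 1 else 0) + (if q < cy then 1 else 0) =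
      msum cx cy cz q + (if q < cx then 1 else 0) + (if q < cy then 1 else 0) := by
    simp only [msum]; omega
  rw [this]

-- ===== VERDICT (by name: the statement is the Claim_ definition above) =====
theorem GenerateSwizzleMask_spec : Claim_equal_GenerateSwizzleMask := by
  intro size hD
  have hb : size.1 ≤ 2 ^ 31 ∧ size.2.1 ≤ 2 ^ 31 ∧ size.2.2 ≤ 2 ^ 31 := by
    simp only [Dom_GenerateSwizzleMask, pvDomInt, Bool.and_eq_true, decide_eq_true_eq] at hD
    omega
  have Hx : ∀ k, ((2 : Int) ^ k < size.1 ↔ k < countAux size.1 40 1 0) := by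
    intro k
    have h := countAux_char size.1 hb.1 32 0 (by omega) k (by omega)
    simpa using h
  have Hy : ∀ k, ((2 : Int) ^ k < size.2.1 ↔ k < countAux size.2.1 40 1 0) := by
    intro k
    have h := countAux_char size.2.1 hb.2.1 32 0 (by omega) k (by omega)
    simpa using h
  have Hz : ∀ k, ((2 : Int) ^ k < size.2.2 ↔ k < countAux size.2.2 40 1 0) := by
    intro k
    have h := countAux_char size.2.2 hb.2.2 32 0 (by omega) k (by omega)
    simpa using h
  have bx : countAux size.1 40 1 0 ≤ 32 := by
    by_contra h
    have := (Hx 32).mpr (by omega)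
    have := two_pow_mono 31 32 (by omega)
    norm_num at this
    omega
  have by' : countAux size.2.1 40 1 0 ≤ 32 := by
    by_contra h
    have := (Hy 32).mpr (by omega)
    have := two_pow_mono 31 32 (by omega)
    norm_num at this
    omega
  have bz : countAux size.2.2 40 1 0 ≤ 32 := by
    by_contra h
    have := (Hz 32).mpr (by omega)
    have := two_pow_mono 31 32 (by omega)
    norm_num at this
    omega
  have main := loop_eq size _ _ _ Hx Hy Hz 32 0 (by omega) bx by' bz 0 0 0
  show GenerateSwizzleMask size = GenerateSwizzleMask_alt size
  rw [GenerateSwizzleMask, GenerateSwizzleMask_alt]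
  simp only [fold_posX, fold_posY, fold_posZ]
  have e0 : msum (countAux size.1 40 1 0) (countAux size.2.1 40 1 0) (countAux size.2.2 40 1 0) 0 = 0 := by
    simp [msum]
  rw [← e0]
  norm_num at main ⊢
  exact main
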